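-- pv_equiv track=rewrite | github.com/Mr-umer/project-bitbash | backend/routes/job_routes.py | validate_job_data
-- ===== SOURCE A (Python) =====
-- def validate_job_data(data, is_update=False):
--     """Validates the job data from the request."""
--     errors = {}
--     required_fields = ['title', 'company', 'location']
--
--     # For creation, all required fields must be present
--     if not is_update:
--         for field in required_fields:
--             if not data.get(field):
--                 errors[field] = f"{field.capitalize()} is required."
--
--     # Check for empty strings on fields that are present
--     for field in required_fields:
--         if field in data and not data.get(field):
--              errors[field] = f"{field.capitalize()} cannot be empty."
--
--     return errors
-- ===== SOURCE B (Python) =====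
-- def validate_job_data(data, is_update=False):
--     """Validates the job data from the request.
--
--     Different strategy from the two-pass version: scan the incoming data once,
--     classifying each required field it mentions as 'empty' or 'ok' in a status
--     map; then render messages from a lookup table, defaulting absent fields to
--     'ok' for updates and 'missing' for creation.
--     """
--     REQUIRED = ('title', 'company', 'location')
--     MESSAGES = {'empty': ' cannot be empty.', 'missing': ' is required.'}
--     status = {}
--     for key, value in data.items():
--         if key in REQUIRED:
--             status[key] = 'ok' if value else 'empty'
--     default = 'ok' if is_update else 'missing'
--     errors = {}
--     for field in REQUIRED:
--         st = status.get(field, default)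
--         if st in MESSAGES:
--             errors[field] = field.capitalize() + MESSAGES[st]
--     return errors
-- ===== Notes on version B (the rewrite author's own statement) =====
-- stated objective: alternative
-- what changed: Replaced A's two staged loops over the required fields (creation pass writing 'is required', then an overwrite pass writing 'cannot be empty') by a single scan over the incoming data that classifies each required field into a status map ('ok'/'empty'), followed by rendering the error messages from a lookup table with a mode-dependent default status for absent fields.
import Mathlib
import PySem

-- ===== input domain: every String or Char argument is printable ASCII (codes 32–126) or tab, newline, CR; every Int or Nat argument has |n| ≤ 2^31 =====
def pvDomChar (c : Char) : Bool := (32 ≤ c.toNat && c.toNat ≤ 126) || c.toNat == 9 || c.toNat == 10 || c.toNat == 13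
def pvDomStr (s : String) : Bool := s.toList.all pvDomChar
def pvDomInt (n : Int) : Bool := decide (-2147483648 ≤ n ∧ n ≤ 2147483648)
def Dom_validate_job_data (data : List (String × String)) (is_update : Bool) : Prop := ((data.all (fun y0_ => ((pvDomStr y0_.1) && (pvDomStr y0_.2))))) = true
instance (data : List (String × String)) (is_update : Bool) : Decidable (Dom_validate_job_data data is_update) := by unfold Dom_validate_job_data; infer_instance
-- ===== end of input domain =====

-- B changes: instead of A's two passes over the required fields (creation pass, then overwrite
-- pass), B scans the incoming data once classifying each required field as 'ok'/'empty' into a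
-- status map, then renders messages from a lookup table (objective: alternative decomposition).

-- ===== PORT A =====
-- str.capitalize(): first char uppercased, rest lowercased (exact on ASCII; hand port, no PySem primitive)
def pyCapitalize (s : String) : String :=
  match s.toList with
  | [] => ""
  | c :: rest => String.ofList (PySem.Chars.upperChar c :: PySem.Chars.lower rest)

def validate_job_data (data : List (String × String)) (is_update : Bool) : List (String × String) :=
  let d := PySem.Dict.ofList data
  let required_fields := ["title", "company", "location"]
  let errors : PySem.Dict String String := PySem.Dict.empty
  -- if not is_update: for field in required_fields: if not data.get(field): errors[field] = ...
  let errors :=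
    if !is_update then
      required_fields.foldl (fun e field =>
        if d.getD field "" = "" then
          e.insert field (pyCapitalize field ++ " is required.")
        else e) errors
    else errors
  -- for field in required_fields: if field in data and not data.get(field): errors[field] = ...
  let errors :=
    required_fields.foldl (fun e field =>
      if d.contains field && (d.getD field "" = "") then
        e.insert field (pyCapitalize field ++ " cannot be empty.")
      else e) errors
  errors.items

-- ===== PORT B =====
def validate_job_data_alt (data : List (String × String)) (is_update : Bool) : List (String × String) :=
  let REQUIRED := ["title", "company", "location"]
  let MESSAGES : PySem.Dict String String :=
    PySem.Dict.ofList [("empty", " cannot be empty."), ("missing", " is required.")]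
  -- for key, value in data.items(): if key in REQUIRED: status[key] = 'ok' if value else 'empty'
  let status : PySem.Dict String String :=
    data.foldl (fun st kv =>
      if REQUIRED.contains kv.1 then
        st.insert kv.1 (if kv.2 ≠ "" then "ok" else "empty")
      else st) PySem.Dict.empty
  let default := if is_update then "ok" else "missing"
  let errors : PySem.Dict String String :=
    REQUIRED.foldl (fun e field =>
      let st := status.getD field default
      if MESSAGES.contains st then
        e.insert field (pyCapitalize field ++ MESSAGES.getD st "")
      else e) PySem.Dict.empty
  errors.items

-- ===== PRECONDITION & SPEC =====
def Spec_validate_job_data (data : List (String × String)) (is_update : Bool) (out : List (String × String)) : Prop := out = validate_job_data_alt data is_update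
instance (data : List (String × String)) (is_update : Bool) (out : List (String × String)) : Decidable (Spec_validate_job_data data is_update out) := by unfold Spec_validate_job_data; infer_instance

-- ===== CLAIM =====
def Claim_equal_validate_job_data : Prop := ∀ (data : List (String × String)) (is_update : Bool), Dom_validate_job_data data is_update → Spec_validate_job_data data is_update (validate_job_data data is_update)

-- ===== LEMMAS AND PROOFS =====

-- B's status map, related to A's dict: for a required field f, the status entry is the
-- 'ok'/'empty' classification of the (last) value of f in data, or absent if f is absent.
theorem status_get (data : List (String × String)) (f : String)
    (hf : ["title", "company", "location"].contains f = true)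
    (st d : PySem.Dict String String)
    (h : st.get? f = (d.get? f).map (fun v => if v ≠ "" then "ok" else "empty")) :
    (data.foldl (fun st kv =>
        if ["title", "company", "location"].contains kv.1 then
          st.insert kv.1 (if kv.2 ≠ "" then "ok" else "empty")
        else st) st).get? f
    = ((data.foldl (fun d kv => d.insert kv.1 kv.2) d).get? f).map
        (fun v => if v ≠ "" then "ok" else "empty") := by
  induction data generalizing st d with
  | nil => simpa using h
  | cons kv rest ih =>
    simp only [List.foldl_cons]
    by_cases hk : f = kv.1
    · subst hk
      rw [if_pos hf]
      exact ih _ _ (by simp)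
    · by_cases hr : (["title", "company", "location"].contains kv.1) = true
      · rw [if_pos hr]
        exact ih _ _ (by simp [PySem.Dict.get?_insert, hk, h])
      · rw [if_neg hr]
        exact ih _ _ (by simp [PySem.Dict.get?_insert, hk, h])

-- ===== VERDICT =====
set_option maxHeartbeats 2000000 in
theorem validate_job_data_spec : Claim_equal_validate_job_data := by
  intro data is_update _
  unfold Spec_validate_job_data validate_job_data validate_job_data_alt
  have h1 := status_get data "title" (by decide) PySem.Dict.empty PySem.Dict.empty (by simp)
  have h2 := status_get data "company" (by decide) PySem.Dict.empty PySem.Dict.empty (by simp)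
  have h3 := status_get data "location" (by decide) PySem.Dict.empty PySem.Dict.empty (by simp)
  simp only [List.foldl]
  set d := PySem.Dict.ofList data with hd
  have hdd : data.foldl (fun d kv => d.insert kv.1 kv.2) PySem.Dict.empty = d := rfl
  rw [hdd] at h1 h2 h3
  have mE : ((PySem.Dict.ofList [("empty", " cannot be empty."), ("missing", " is required.")] : PySem.Dict String String)).get? "empty" = some " cannot be empty." := by decide
  have mM : ((PySem.Dict.ofList [("empty", " cannot be empty."), ("missing", " is required.")] : PySem.Dict String String)).get? "missing" = some " is required." := by decide
  have mO : ((PySem.Dict.ofList [("empty", " cannot be empty."), ("missing", " is required.")] : PySem.Dict String String)).get? "ok" = none := by decide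
  rcases g1 : d.get? "title" with _ | v1 <;>
  rcases g2 : d.get? "company" with _ | v2 <;>
  rcases g3 : d.get? "location" with _ | v3 <;>
  rw [g1] at h1 <;> rw [g2] at h2 <;> rw [g3] at h3 <;>
  cases is_update <;>
  simp_all [PySem.Dict.getD_eq_get?_getD, PySem.Dict.contains_eq_isSome_get?] <;>
  split_ifs <;>
  simp_all <;> decide
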